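-- pv_equiv track=rewrite | github.com/Lil-Young/Programmers | Lv.1 x만큼 간격이 있는 n개의 숫자.py | solution
-- ===== SOURCE A (Python) =====
-- def solution(x, n):
--     if x > 0:
--         answer = [x for x in range(x, x*n+1, x)]
--     elif x == 0:
--         answer = [0] * n
--     else:
--         answer = [x for x in range(x, x*n-1, x)]
--     return answer
-- ===== SOURCE B (Python) =====
-- def solution(x, n):
--     return [x * i for i in range(1, n + 1)]
-- ===== Notes on version B (the rewrite author's own statement) =====
-- stated objective: simpler
-- what changed: Replaces the three sign-of-x branches (two stepped ranges and a list-repeat) with a single uniform comprehension computing each term as x times its 1-based index.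
import Mathlib
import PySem

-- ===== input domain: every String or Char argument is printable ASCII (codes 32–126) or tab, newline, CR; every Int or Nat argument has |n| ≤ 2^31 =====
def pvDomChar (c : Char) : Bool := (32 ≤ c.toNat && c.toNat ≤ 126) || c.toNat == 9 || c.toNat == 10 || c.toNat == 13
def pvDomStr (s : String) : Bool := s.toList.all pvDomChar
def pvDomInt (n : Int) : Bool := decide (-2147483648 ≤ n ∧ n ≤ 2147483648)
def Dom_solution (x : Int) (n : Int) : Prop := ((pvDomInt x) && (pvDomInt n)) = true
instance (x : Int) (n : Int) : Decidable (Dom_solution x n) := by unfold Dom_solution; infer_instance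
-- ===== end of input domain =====

-- B replaces A's three sign-of-x branches with one uniform comprehension x*i for i in 1..n (simpler).

-- ===== PORT A =====
def solution (x : Int) (n : Int) : List Int :=
  if x > 0 then
    (PySem.List.pyRange x (x * n + 1) x).map (fun x => x)
  else if x = 0 then
    List.replicate n.toNat 0           -- [0] * n  (empty for n ≤ 0, as in Python)
  else
    (PySem.List.pyRange x (x * n - 1) x).map (fun x => x)

-- ===== PORT B =====
def solution_alt (x : Int) (n : Int) : List Int :=
  (PySem.List.pyRange 1 (n + 1) 1).map (fun i => x * i)

-- ===== PRECONDITION & SPEC =====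
def Spec_solution (x : Int) (n : Int) (out : List Int) : Prop := out = solution_alt x n
instance (x : Int) (n : Int) (out : List Int) : Decidable (Spec_solution x n out) := by unfold Spec_solution; infer_instance

-- ===== CLAIM (what is proved, stated in full; the proofs are below) =====
def Claim_equal_solution : Prop := ∀ (x : Int) (n : Int), Dom_solution x n → Spec_solution x n (solution x n)

-- ===== LEMMAS AND PROOFS =====

-- B in closed form: n.toNat elements, the k-th (0-based) being x + x*k.
theorem solution_alt_eq (x n : Int) :
    solution_alt x n = (List.range n.toNat).map (fun k : Nat => x + x * (k : Int)) := by
  unfold solution_alt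
  rw [PySem.List.pyRange_one]
  simp only [List.map_map]
  have h1 : (n + 1 - 1).toNat = n.toNat := by omega
  rw [h1]
  refine List.map_congr_left (fun k _ => ?_)
  simp only [Function.comp]
  ring

-- ===== VERDICT (by name: the statement is the Claim_ definition above) =====
theorem solution_spec : Claim_equal_solution := by
  intro x n _
  unfold Spec_solution
  rw [solution_alt_eq]
  unfold solution
  rcases lt_trichotomy x 0 with hx | hx | hx
  · -- x < 0: range(x, x*n-1, x)
    rw [if_neg (by omega), if_neg (by omega), PySem.List.pyRange_of_neg _ _ hx]
    simp only [List.map_map]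
    have harg : x - (x * n - 1) + -x - 1 = -x * n := by ring
    rw [harg, Int.mul_ediv_cancel_left _ (by omega : (-x) ≠ 0)]
    by_cases hn : 1 ≤ n
    · have : x * n - 1 < x := by nlinarith
      rw [if_pos this]; simp
    · have : ¬ (x * n - 1 < x) := by nlinarith [mul_nonneg (by omega : (0:Int) ≤ -x) (by omega : (0:Int) ≤ -n)]
      rw [if_neg this]
      have : n.toNat = 0 := by omega
      rw [this]; simp
  · -- x = 0: [0] * n
    subst hx
    rw [if_neg (by omega), if_pos rfl]
    simp [List.map_const']
  · -- x > 0: range(x, x*n+1, x)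
    rw [if_pos hx, PySem.List.pyRange_of_pos _ _ hx]
    simp only [List.map_map]
    have harg : x * n + 1 - x + x - 1 = x * n := by ring
    rw [harg, Int.mul_ediv_cancel_left _ (by omega : x ≠ 0)]
    by_cases hn : 1 ≤ n
    · have : x < x * n + 1 := by nlinarith
      rw [if_pos this]; simp
    · have : ¬ (x < x * n + 1) := by nlinarith
      rw [if_neg this]
      have : n.toNat = 0 := by omega
      rw [this]; simp
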